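-- pv_equiv track=rewrite | github.com/gsoaresbaptista/course-forge | src/course_forge/application/processors/karnaugh_map_processor.py | _derive_pattern
-- ===== SOURCE A (Python) =====
-- def _derive_pattern(cells: list[str]) -> str | None:
--     """Derive Schemdraw wildcard pattern from list of cells."""
--     if not cells:
--         return None
--
--     n = len(cells[0])
--     # Verify all cells have same length
--     if any(len(c) != n for c in cells):
--         return None
--
--     pattern = []
--     for i in range(n):
--         bits = set(c[i] for c in cells)
--         if len(bits) == 1:
--             pattern.append(bits.pop())
--         else:
--             pattern.append('.')
--
--     return "".join(pattern)
-- ===== SOURCE B (Python) =====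
-- def _derive_pattern(cells: list[str]) -> str | None:
--     """Derive Schemdraw wildcard pattern from list of cells."""
--     if not cells:
--         return None
--     pattern = list(cells[0])
--     n = len(pattern)
--     for cell in cells[1:]:
--         if len(cell) != n:
--             return None
--         for i, ch in enumerate(cell):
--             if ch != pattern[i] and pattern[i] != '.':
--                 pattern[i] = '.'
--     return "".join(pattern)
-- ===== Notes on version B (the rewrite author's own statement) =====
-- stated objective: alternative
-- what changed: Row-by-row fold over the cells maintaining a mutable pattern accumulator (position set to '.' on first disagreement), replacing A's per-column construction of a character set for each index.
import Mathlib
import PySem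

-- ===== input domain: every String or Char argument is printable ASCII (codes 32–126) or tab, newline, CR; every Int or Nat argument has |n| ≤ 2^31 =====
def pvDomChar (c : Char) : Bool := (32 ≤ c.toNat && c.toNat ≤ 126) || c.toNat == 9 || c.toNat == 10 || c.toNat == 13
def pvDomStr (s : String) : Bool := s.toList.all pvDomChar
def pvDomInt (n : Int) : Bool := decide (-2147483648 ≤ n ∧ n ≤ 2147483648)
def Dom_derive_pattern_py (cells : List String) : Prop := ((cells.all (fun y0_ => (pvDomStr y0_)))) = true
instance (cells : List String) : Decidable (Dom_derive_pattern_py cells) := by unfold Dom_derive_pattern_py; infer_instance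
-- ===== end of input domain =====

-- B replaces A's per-column character-set construction by a single row-by-row fold
-- updating a wildcard accumulator; alternative decomposition, same cost.


-- ===== PORT A =====
-- literal port of A: guard empty, guard ragged lengths, then for each column i
-- build the set of column characters and take its unique element or '.'.
-- c[i] is ported as getD with a dummy default: the guards ensure i < length of every cell.
def derive_pattern_py (cells : List String) : Option String :=
  match cells with
  | [] => none
  | c0 :: _ =>
    let n := c0.toList.length
    if cells.any (fun c => c.toList.length ≠ n) then none
    else
      let pattern := (List.range n).map (fun i =>
        let bits : PySem.Set Char := PySem.Set.ofList (cells.map (fun c => c.toList.getD i ' '))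
        match bits with
        | [b] => b
        | _ => '.')
      some (String.mk pattern)

-- ===== PORT B =====
-- port of Source B: seed the accumulator with cells[0], fold over the remaining cells
-- (Option models the early `return None` on a ragged cell), blanking each position
-- whose character disagrees with a non-'.' accumulator entry.
def derive_pattern_py_alt_step (n : Nat) (acc : Option (List Char)) (cell : String) : Option (List Char) :=
  match acc with
  | none => none
  | some pat =>
    if cell.toList.length ≠ n then none
    else some (pat.zipWith (fun p ch => if ch ≠ p ∧ p ≠ '.' then '.' else p) cell.toList)

def derive_pattern_py_alt (cells : List String) : Option String :=
  match cells with
  | [] => none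
  | c0 :: rest =>
    match rest.foldl (derive_pattern_py_alt_step c0.toList.length) (some c0.toList) with
    | none => none
    | some pat => some (String.mk pat)

-- ===== PRECONDITION & SPEC =====
def Spec_derive_pattern_py (cells : List String) (out : Option String) : Prop := out = derive_pattern_py_alt cells
instance (cells : List String) (out : Option String) : Decidable (Spec_derive_pattern_py cells out) := by unfold Spec_derive_pattern_py; infer_instance

-- ===== CLAIM (what is proved, stated in full; the proofs are below) =====
def Claim_equal_derive_pattern_py : Prop := ∀ (cells : List String), Dom_derive_pattern_py cells → Spec_derive_pattern_py cells (derive_pattern_py cells)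

-- ===== LEMMAS AND PROOFS =====

theorem foldB_none (n : Nat) (rest : List String) :
    rest.foldl (derive_pattern_py_alt_step n) none = none := by
  induction rest with
  | nil => rfl
  | cons c t ih => simpa [derive_pattern_py_alt_step] using ih

-- if some remaining cell has the wrong length, the fold aborts to none
theorem foldB_bad (n : Nat) (rest : List String) (pat : List Char)
    (h : ∃ c ∈ rest, c.toList.length ≠ n) :
    rest.foldl (derive_pattern_py_alt_step n) (some pat) = none := by
  induction rest generalizing pat with
  | nil => simp at h
  | cons c t ih =>
    rcases h with ⟨d, hd, hlen⟩
    rcases List.mem_cons.mp hd with rfl | hdt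
    · have hlen' : ¬ d.length = n := by simpa using hlen
      simp [derive_pattern_py_alt_step, hlen', foldB_none]
    · by_cases hc : c.toList.length = n
      · have hc' : c.length = n := by simpa using hc
        simp only [List.foldl_cons, derive_pattern_py_alt_step]
        rw [if_neg (by simpa using hc)]
        exact ih _ ⟨d, hdt, hlen⟩
      · have hc' : ¬ c.length = n := by simpa using hc
        simp [derive_pattern_py_alt_step, hc', foldB_none]

-- the good-lengths fold, characterised pointwise
theorem foldB_good (n : Nat) (rest : List String) (pat : List Char)
    (hpat : pat.length = n) (h : ∀ c ∈ rest, c.toList.length = n) :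
    rest.foldl (derive_pattern_py_alt_step n) (some pat) =
      some ((List.range n).map (fun i =>
        if rest.all (fun c => c.toList.getD i ' ' == pat.getD i ' ')
        then pat.getD i ' ' else '.')) := by
  induction rest generalizing pat with
  | nil =>
    simp only [List.foldl_nil, List.all_nil, Option.some.injEq]
    subst hpat
    refine (List.ext_getElem (by simp) ?_).symm
    intro i h1 h2
    simp [List.getD_eq_getElem?_getD, List.getElem?_eq_getElem h2]
  | cons c t ih =>
    have hc : c.toList.length = n := h c (List.mem_cons_self ..)
    have hpat' : (pat.zipWith (fun p ch => if ch ≠ p ∧ p ≠ '.' then '.' else p) c.toList).length = n := by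
      simp [List.length_zipWith, hpat, hc]
    simp only [List.foldl_cons, derive_pattern_py_alt_step]
    rw [if_neg (by omega : ¬ c.toList.length ≠ n)]
    rw [ih _ hpat' (fun d hd => h d (List.mem_cons_of_mem _ hd))]
    refine congrArg some (List.map_congr_left ?_)
    intro i hi
    have hi' : i < n := List.mem_range.mp hi
    have h1 : i < pat.length := by omega
    have h2 : i < c.toList.length := by omega
    have hcg : c.toList[i]? = some (c.toList[i]) := List.getElem?_eq_getElem h2
    have hpg : pat[i]? = some pat[i] := List.getElem?_eq_getElem h1
    have hz : (pat.zipWith (fun p ch => if ch ≠ p ∧ p ≠ '.' then '.' else p) c.toList).getD i ' '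
        = (if c.toList.getD i ' ' ≠ pat.getD i ' ' ∧ pat.getD i ' ' ≠ '.' then '.' else pat.getD i ' ') := by
      simp [List.getD_eq_getElem?_getD, List.getElem?_zipWith, hcg, hpg]
    rw [hz]
    by_cases he : c.toList.getD i ' ' = pat.getD i ' '
    · have hfp : (if c.toList.getD i ' ' ≠ pat.getD i ' ' ∧ pat.getD i ' ' ≠ '.' then '.' else pat.getD i ' ') = pat.getD i ' ' :=
        if_neg (fun hcon => hcon.1 he)
      rw [hfp]
      rw [List.all_cons, show (c.toList.getD i ' ' == pat.getD i ' ') = true from beq_iff_eq.mpr he,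
        Bool.true_and]
    · have hf : (if c.toList.getD i ' ' ≠ pat.getD i ' ' ∧ pat.getD i ' ' ≠ '.' then '.' else pat.getD i ' ') = '.' := by
        by_cases hdot : pat.getD i ' ' = '.'
        · rw [if_neg (fun hcon => hcon.2 hdot)]; exact hdot
        · exact if_pos ⟨he, hdot⟩
      rw [hf, ite_self]
      rw [if_neg (by
        rw [List.all_cons, Bool.and_eq_true]
        rintro ⟨hb, -⟩
        exact he (beq_iff_eq.mp hb))]

-- PySem.Set.ofList of a constant nonempty list is the singleton
theorem ofList_const (x : Char) (xs : List Char) (h : ∀ y ∈ xs, y = x) :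
    PySem.Set.ofList (x :: xs) = [x] := by
  have key : ∀ (ys : List Char), (∀ y ∈ ys, y = x) → ys.foldl PySem.Set.add [x] = [x] := by
    intro ys
    induction ys with
    | nil => intro _; rfl
    | cons y t ih =>
      intro hy
      have : y = x := hy y (List.mem_cons_self ..)
      subst this
      rw [List.foldl_cons, show PySem.Set.add [y] y = [y] by simp [PySem.Set.add]]
      exact ih (fun z hz => hy z (List.mem_cons_of_mem _ hz))
  calc PySem.Set.ofList (x :: xs) = xs.foldl PySem.Set.add [x] := by
        simp [PySem.Set.ofList_eq_foldl, PySem.Set.add, PySem.Set.empty]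
    _ = [x] := key xs h

theorem matchA_eq (x : Char) (xs : List Char) :
    (match PySem.Set.ofList (x :: xs) with
      | [b] => b
      | _ => '.') = if xs.all (fun y => y == x) then x else '.' := by
  by_cases hall : ∀ y ∈ xs, y = x
  · rw [ofList_const x xs hall,
      if_pos (by simp only [List.all_eq_true, beq_iff_eq]; exact hall)]
  · push_neg at hall
    rcases hall with ⟨y, hy, hne⟩
    have hx : x ∈ PySem.Set.ofList (x :: xs) := by
      rw [PySem.Set.mem_ofList]; exact List.mem_cons_self ..
    have hy' : y ∈ PySem.Set.ofList (x :: xs) := by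
      rw [PySem.Set.mem_ofList]; exact List.mem_cons_of_mem _ hy
    have hns : ∀ b, PySem.Set.ofList (x :: xs) ≠ [b] := by
      intro b hb
      rw [hb] at hx hy'
      simp at hx hy'
      exact hne (hy'.trans hx.symm)
    have hif : (if xs.all (fun y => y == x) then x else '.') = '.' := by
      rw [if_neg]
      simp only [List.all_eq_true, beq_iff_eq]
      intro hc; exact hne (hc y hy)
    rcases hl : PySem.Set.ofList (x :: xs) with - | ⟨a, - | ⟨b, t⟩⟩
    · rw [hl] at hx; cases hx
    · exact absurd hl (hns a)
    · rw [hif]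

-- ===== VERDICT (by name: the statement is the Claim_ definition above) =====
theorem derive_pattern_py_spec : Claim_equal_derive_pattern_py := by
  intro cells _
  show derive_pattern_py cells = derive_pattern_py_alt cells
  match cells with
  | [] => rfl
  | c0 :: rest =>
    simp only [derive_pattern_py, derive_pattern_py_alt]
    by_cases hbad : ∃ c ∈ rest, c.toList.length ≠ c0.toList.length
    · rw [foldB_bad _ _ _ hbad]
      rw [if_pos (by
        simp only [List.any_eq_true, decide_eq_true_eq]
        rcases hbad with ⟨c, hc, hlen⟩
        exact ⟨c, List.mem_cons_of_mem _ hc, hlen⟩)]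
    · push_neg at hbad
      rw [foldB_good _ _ _ rfl hbad]
      rw [if_neg (by
        simp only [List.any_eq_true, decide_eq_true_eq, not_exists]
        rintro c ⟨hc, hlen⟩
        rcases List.mem_cons.mp hc with rfl | hcr
        · exact hlen rfl
        · exact hlen (hbad c hcr))]
      refine congrArg (fun l => some (String.mk l)) (List.map_congr_left ?_)
      intro i hi
      show (match PySem.Set.ofList (((c0 :: rest).map (fun c => c.toList.getD i ' '))) with
            | [b] => b | _ => '.') = _
      rw [List.map_cons, matchA_eq]
      simp [List.all_map]
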